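-- pv_equiv track=rewrite | github.com/facebookresearch/pytorch_GAN_zoo | models/metrics/nn_score.py | getStatsOnDataset
-- ===== SOURCE A (Python) =====
-- def getStatsOnDataset(attributes):
--
--     stats = {}
--
--     for name, data in attributes.items():
--         for key, value in data.items():
--
--             if key not in stats:
--                 stats[key] = {}
--
--             if value not in stats[key]:
--                 stats[key][value] = 0
--
--             stats[key][value] += 1
--     return stats
-- ===== SOURCE B (Python) =====
-- def getStatsOnDataset(attributes):
--     # Phase 1: group every (key, value) occurrence into per-key value lists.
--     grouped = {}
--     for data in attributes.values():
--         for key, value in data.items():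
--             grouped.setdefault(key, []).append(value)
--     # Phase 2: tally each group into a plain counts dict.
--     return {key: _tally(vals) for key, vals in grouped.items()}
--
--
-- def _tally(vals):
--     counts = {}
--     for v in vals:
--         counts[v] = counts.get(v, 0) + 1
--     return counts
-- ===== Notes on version B (the rewrite author's own statement) =====
-- stated objective: alternative
-- what changed: Replaces the single incremental nested-counting pass with a two-phase shape: one pass groups every (key, value) occurrence into per-key value lists, then a separate pass tallies each list into a counts dict.
import Mathlib
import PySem

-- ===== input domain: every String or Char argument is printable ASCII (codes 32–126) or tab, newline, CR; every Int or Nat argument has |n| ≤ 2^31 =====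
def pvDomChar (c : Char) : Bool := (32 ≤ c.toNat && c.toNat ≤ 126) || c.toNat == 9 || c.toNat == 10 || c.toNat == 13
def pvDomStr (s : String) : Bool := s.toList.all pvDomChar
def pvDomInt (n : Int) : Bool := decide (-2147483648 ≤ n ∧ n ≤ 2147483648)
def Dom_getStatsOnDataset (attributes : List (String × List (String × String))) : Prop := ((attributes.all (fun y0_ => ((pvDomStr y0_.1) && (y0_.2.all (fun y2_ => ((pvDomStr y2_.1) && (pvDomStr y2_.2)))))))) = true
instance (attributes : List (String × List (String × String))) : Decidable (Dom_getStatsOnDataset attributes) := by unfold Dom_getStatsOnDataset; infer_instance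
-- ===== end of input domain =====

-- B replaces A's single incremental nested-counting pass by a two-phase shape (group values per key, then tally each group); alternative decomposition, same cost.


-- ===== PORT A =====
-- literal transliteration of A: one pass, incrementally counting into a nested dict
def getStatsOnDataset (attributes : List (String × List (String × String))) : List (String × List (String × Int)) :=
  let stats : PySem.Dict String (PySem.Dict String Int) :=
    attributes.foldl (fun stats nd =>
      nd.2.foldl (fun stats kv =>
        -- if key not in stats: stats[key] = {}
        let stats := if stats.contains kv.1 then stats
                     else stats.insert kv.1 PySem.Dict.empty
        let inner := stats.getD kv.1 PySem.Dict.empty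
        -- if value not in stats[key]: stats[key][value] = 0
        let inner := if inner.contains kv.2 then inner
                     else inner.insert kv.2 0
        -- stats[key][value] += 1
        stats.insert kv.1 (inner.insert kv.2 (inner.getD kv.2 0 + 1)))
        stats)
      PySem.Dict.empty
  stats.items.map (fun p => (p.1, p.2.items))

-- ===== PORT B =====
-- _tally(vals): counts = {}; for v in vals: counts[v] = counts.get(v, 0) + 1
def pvTally (vals : List String) : PySem.Dict String Int :=
  vals.foldl (fun counts v => counts.insert v (counts.getD v 0 + 1)) PySem.Dict.empty

def getStatsOnDataset_alt (attributes : List (String × List (String × String))) : List (String × List (String × Int)) :=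
  -- phase 1: grouped.setdefault(key, []).append(value)
  let grouped : PySem.Dict String (List String) :=
    attributes.foldl (fun grouped nd =>
      nd.2.foldl (fun grouped kv => grouped.modify kv.1 [] (· ++ [kv.2])) grouped)
      PySem.Dict.empty
  -- phase 2: {key: _tally(vals) for key, vals in grouped.items()}
  grouped.items.map (fun p => (p.1, (pvTally p.2).items))

-- ===== PRECONDITION & SPEC =====
def Spec_getStatsOnDataset (attributes : List (String × List (String × String))) (out : List (String × List (String × Int))) : Prop := out = getStatsOnDataset_alt attributes
instance (attributes : List (String × List (String × String))) (out : List (String × List (String × Int))) : Decidable (Spec_getStatsOnDataset attributes out) := by unfold Spec_getStatsOnDataset; infer_instance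

-- ===== CLAIM (what is proved, stated in full; the proofs are below) =====
def Claim_equal_getStatsOnDataset : Prop := ∀ (attributes : List (String × List (String × String))), Dom_getStatsOnDataset attributes → Spec_getStatsOnDataset attributes (getStatsOnDataset attributes)

-- ===== LEMMAS AND PROOFS =====

-- A's inner loop body, named for the proofs (definitionally A's lambda)
def pvStepA (stats : PySem.Dict String (PySem.Dict String Int)) (kv : String × String) :
    PySem.Dict String (PySem.Dict String Int) :=
  let stats := if stats.contains kv.1 then stats
               else stats.insert kv.1 PySem.Dict.empty
  let inner := stats.getD kv.1 PySem.Dict.empty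
  let inner := if inner.contains kv.2 then inner
               else inner.insert kv.2 0
  stats.insert kv.1 (inner.insert kv.2 (inner.getD kv.2 0 + 1))

-- B's grouping loop body (modify is definitionally insert of the appended list)
def pvStepG (g : PySem.Dict String (List String)) (kv : String × String) :
    PySem.Dict String (List String) :=
  g.modify kv.1 [] (· ++ [kv.2])

-- the invariant's abstraction: apply pvTally to every value of the grouping dict
def pvMapVals (g : PySem.Dict String (List String)) : PySem.Dict String (PySem.Dict String Int) :=
  PySem.Dict.mk (g.items.map (fun p => (p.1, pvTally p.2)))

theorem pvGet?_mapVals (g : PySem.Dict String (List String)) (k : String) :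
    (pvMapVals g).get? k = (g.get? k).map pvTally := by
  obtain ⟨l⟩ := g
  induction l with
  | nil => rfl
  | cons p rest ih =>
    obtain ⟨a, vs⟩ := p
    simp only [pvMapVals, List.map_cons] at *
    rw [PySem.Dict.get?_mk_cons, PySem.Dict.get?_mk_cons]
    by_cases h : a == k
    · simp [h]
    · simp only [h, Bool.false_eq_true, ite_false]
      exact ih

theorem pvContains_mapVals (g : PySem.Dict String (List String)) (k : String) :
    (pvMapVals g).contains k = g.contains k := by
  rw [PySem.Dict.contains_eq_isSome_get?, PySem.Dict.contains_eq_isSome_get?, pvGet?_mapVals]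
  cases g.get? k <;> rfl

theorem pvItems_mapVals (g : PySem.Dict String (List String)) :
    (pvMapVals g).items = g.items.map (fun p => (p.1, pvTally p.2)) := rfl

theorem pvMapVals_insert (g : PySem.Dict String (List String)) (k : String) (w : List String) :
    pvMapVals (g.insert k w) = (pvMapVals g).insert k (pvTally w) := by
  apply PySem.Dict.ext
  by_cases h : g.contains k = true
  · rw [pvItems_mapVals, PySem.Dict.items_insert_of_contains _ _ h,
      PySem.Dict.items_insert_of_contains _ _ ((pvContains_mapVals g k).trans h),
      pvItems_mapVals, List.map_map, List.map_map]
    apply List.map_congr_left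
    intro p _
    by_cases hp : p.1 = k <;> simp [hp]
  · have h' : g.contains k = false := by simpa using h
    rw [pvItems_mapVals, PySem.Dict.items_insert_of_not_contains _ _ h',
      PySem.Dict.items_insert_of_not_contains _ _ ((pvContains_mapVals g k).trans h'),
      pvItems_mapVals]
    simp

-- A's inner two statements collapse to one overwrite-insert
theorem pvStepInner (d : PySem.Dict String Int) (v : String) :
    (let d1 := if d.contains v then d else d.insert v 0;
     d1.insert v (d1.getD v 0 + 1)) = d.insert v (d.getD v 0 + 1) := by
  by_cases h : d.contains v = true
  · simp [h]
  · have h' : d.contains v = false := by simpa using h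
    simp only [h', Bool.false_eq_true, ite_false]
    rw [PySem.Dict.getD_insert_self, PySem.Dict.insert_insert_self,
      PySem.Dict.getD_of_not_contains d 0 h']

theorem pvTally_snoc (vs : List String) (v : String) :
    pvTally (vs ++ [v]) = (pvTally vs).insert v ((pvTally vs).getD v 0 + 1) := by
  simp [pvTally, List.foldl_append]

-- crux: one A-step on the tallied view is one B-group-step, tallied
theorem pvStep_comm (g : PySem.Dict String (List String)) (kv : String × String) :
    pvStepA (pvMapVals g) kv = pvMapVals (pvStepG g kv) := by
  obtain ⟨k, v⟩ := kv
  have hmod : pvStepG g (k, v) = g.insert k (g.getD k [] ++ [v]) := rfl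
  rw [hmod, pvMapVals_insert]
  cases hg : g.get? k with
  | none =>
    have hc : g.contains k = false := by
      rw [PySem.Dict.contains_eq_isSome_get?, hg]; rfl
    have hc' : (pvMapVals g).contains k = false := (pvContains_mapVals g k).trans hc
    have hgD : g.getD k [] = [] := PySem.Dict.getD_of_not_contains g [] hc
    rw [hgD]
    simp only [pvStepA, hc', Bool.false_eq_true, ite_false]
    rw [PySem.Dict.getD_insert_self]
    rw [pvStepInner PySem.Dict.empty v, PySem.Dict.insert_insert_self]
    rfl
  | some vs =>
    have hc : g.contains k = true := by
      rw [PySem.Dict.contains_eq_isSome_get?, hg]; rfl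
    have hc' : (pvMapVals g).contains k = true := (pvContains_mapVals g k).trans hc
    have hgD : g.getD k [] = vs := PySem.Dict.getD_of_get?_eq_some g [] hg
    have hmD : (pvMapVals g).getD k PySem.Dict.empty = pvTally vs :=
      PySem.Dict.getD_of_get?_eq_some (pvMapVals g) PySem.Dict.empty
        (by rw [pvGet?_mapVals, hg]; rfl)
    rw [hgD, pvTally_snoc]
    simp only [pvStepA, hc', ite_true, hmD]
    rw [pvStepInner (pvTally vs) v]

theorem pvInnerFold (ps : List (String × String)) (g : PySem.Dict String (List String)) :
    ps.foldl pvStepA (pvMapVals g) = pvMapVals (ps.foldl pvStepG g) := by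
  induction ps generalizing g with
  | nil => rfl
  | cons kv rest ih => rw [List.foldl_cons, List.foldl_cons, pvStep_comm, ih]

theorem pvOuterFold (l : List (String × List (String × String))) (g : PySem.Dict String (List String)) :
    l.foldl (fun s nd => nd.2.foldl pvStepA s) (pvMapVals g)
      = pvMapVals (l.foldl (fun g nd => nd.2.foldl pvStepG g) g) := by
  induction l generalizing g with
  | nil => rfl
  | cons nd rest ih => rw [List.foldl_cons, List.foldl_cons, pvInnerFold, ih]

-- ===== VERDICT (by name: the statement is the Claim_ definition above) =====
theorem getStatsOnDataset_spec : Claim_equal_getStatsOnDataset := by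
  intro attributes _
  show getStatsOnDataset attributes = getStatsOnDataset_alt attributes
  show (attributes.foldl (fun s nd => nd.2.foldl pvStepA s) (pvMapVals (PySem.Dict.mk []))).items.map
        (fun p => (p.1, p.2.items))
      = ((attributes.foldl (fun g nd => nd.2.foldl pvStepG g) (PySem.Dict.mk [])).items.map
        (fun p => (p.1, (pvTally p.2).items)))
  rw [pvOuterFold]
  simp [pvMapVals]
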